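-- pv_equiv track=rewrite | github.com/tednaleid/upscale | check_iris_api.py | extract_typedef_line
-- ===== SOURCE A (Python) =====
-- def extract_typedef_line(lines, ending):
--     """Extract a typedef/enum ending with the given text.
--
--     If the matching line contains '}', walk back to find the opening typedef/enum block.
--     Otherwise treat as a single-line declaration.
--     """
--     for i, line in enumerate(lines):
--         if ending in line:
--             if "}" not in line:
--                 # Single-line typedef
--                 return line
--             # Multi-line block: walk back to find opening typedef/enum
--             for j in range(i - 1, -1, -1):
--                 if "typedef" in lines[j] or "enum" in lines[j]:
--                     return "\n".join(lines[j:i + 1])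
--             return line
--     return None
-- ===== SOURCE B (Python) =====
-- def extract_typedef_line(lines, ending):
--     """Single forward pass: maintain the current open typedef/enum block."""
--     block = None
--     for line in lines:
--         if ending in line:
--             if "}" not in line:
--                 return line
--             return "\n".join(block + [line]) if block is not None else line
--         if "typedef" in line or "enum" in line:
--             block = [line]
--         elif block is not None:
--             block.append(line)
--     return None
-- ===== Notes on version B (the rewrite author's own statement) =====
-- stated objective: alternative
-- what changed: Replaced the backward index walk (range(i-1,-1,-1) with slicing lines[j:i+1]) by a single forward pass that carries the current open typedef/enum block as an accumulator list, so no index arithmetic or backward scan is needed.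
import Mathlib
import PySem

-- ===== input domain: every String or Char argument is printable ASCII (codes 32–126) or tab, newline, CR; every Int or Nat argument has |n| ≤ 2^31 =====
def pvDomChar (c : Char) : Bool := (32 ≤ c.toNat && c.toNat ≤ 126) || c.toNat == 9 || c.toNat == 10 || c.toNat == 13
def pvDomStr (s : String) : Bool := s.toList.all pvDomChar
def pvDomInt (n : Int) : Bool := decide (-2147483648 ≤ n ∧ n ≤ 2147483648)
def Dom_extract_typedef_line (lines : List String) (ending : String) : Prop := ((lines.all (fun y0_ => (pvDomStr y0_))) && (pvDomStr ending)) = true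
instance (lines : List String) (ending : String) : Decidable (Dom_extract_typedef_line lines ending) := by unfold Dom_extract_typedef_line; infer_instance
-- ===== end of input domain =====

-- B replaces A's backward index walk with a single forward pass that carries the
-- current open typedef/enum block as an accumulator (alternative decomposition, same cost).


-- ===== PORT A =====
-- A's inner loop 'for j in range(i-1,-1,-1): if "typedef" in lines[j] or "enum" in lines[j]: …'
-- walks the prefix lines[0:i] back-to-front; here the prefix is carried REVERSED, so the walk is a
-- front-to-back scan returning lines[j:i] (reversed) when it finds the opener, none when it reaches -1.
def pvFindBlockA (rev : List String) : Option (List String) :=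
  match rev with
  | [] => none
  | l :: rs =>
    if PySem.Str.isIn "typedef" l || PySem.Str.isIn "enum" l then some [l]
    else (pvFindBlockA rs).map (fun b => l :: b)

-- the 'for i, line in enumerate(lines)' loop; rev = the already-seen prefix, reversed
def pvLoopA (ending : String) (rev : List String) (rest : List String) : Option String :=
  match rest with
  | [] => none
  | line :: rest' =>
    if PySem.Str.isIn ending line then
      if !(PySem.Str.isIn "}" line) then some line
      else
        match pvFindBlockA rev with
        | some blkRev => some (PySem.Str.join "\n" (blkRev.reverse ++ [line]))
        | none => some line
    else pvLoopA ending (line :: rev) rest'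

def extract_typedef_line (lines : List String) (ending : String) : Option String :=
  pvLoopA ending [] lines

-- ===== PORT B =====
-- single forward pass; block = the lines of the currently open typedef/enum block, if any
def pvLoopB (ending : String) (block : Option (List String)) (rest : List String) : Option String :=
  match rest with
  | [] => none
  | line :: rest' =>
    if PySem.Str.isIn ending line then
      if !(PySem.Str.isIn "}" line) then some line
      else
        match block with
        | some blk => some (PySem.Str.join "\n" (blk ++ [line]))
        | none => some line
    else
      pvLoopB ending
        (if PySem.Str.isIn "typedef" line || PySem.Str.isIn "enum" line then some [line]
         else block.map (fun b => b ++ [line]))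
        rest'

def extract_typedef_line_alt (lines : List String) (ending : String) : Option String :=
  pvLoopB ending none lines

-- ===== PRECONDITION & SPEC =====
def Spec_extract_typedef_line (lines : List String) (ending : String) (out : Option String) : Prop := out = extract_typedef_line_alt lines ending
instance (lines : List String) (ending : String) (out : Option String) : Decidable (Spec_extract_typedef_line lines ending out) := by unfold Spec_extract_typedef_line; infer_instance

-- ===== CLAIM (what is proved, stated in full; the proofs are below) =====
def Claim_equal_extract_typedef_line : Prop := ∀ (lines : List String) (ending : String), Dom_extract_typedef_line lines ending → Spec_extract_typedef_line lines ending (extract_typedef_line lines ending)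

-- ===== LEMMAS AND PROOFS =====

-- invariant: B's accumulator is A's (reversed-prefix) block search result, reversed
theorem pvLoop_eq (ending : String) (rest : List String) :
    ∀ (rev : List String) (block : Option (List String)),
      (pvFindBlockA rev).map List.reverse = block →
      pvLoopA ending rev rest = pvLoopB ending block rest := by
  induction rest with
  | nil => intro rev block _; rfl
  | cons line rest' ih =>
    intro rev block hinv
    simp only [pvLoopA, pvLoopB]
    by_cases hEnd : PySem.Str.isIn ending line = true
    · simp only [hEnd, if_true]
      subst hinv
      cases pvFindBlockA rev <;> simp
    · simp only [hEnd, if_false, Bool.false_eq_true]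
      apply ih
      simp only [pvFindBlockA]
      by_cases hop : (PySem.Str.isIn "typedef" line || PySem.Str.isIn "enum" line) = true
      · rw [if_pos hop, if_pos hop]; rfl
      · rw [if_neg hop, if_neg hop]
        subst hinv
        cases pvFindBlockA rev <;> simp

-- ===== VERDICT (by name: the statement is the Claim_ definition above) =====
theorem extract_typedef_line_spec : Claim_equal_extract_typedef_line := by
  intro lines ending _
  unfold Spec_extract_typedef_line extract_typedef_line extract_typedef_line_alt
  exact pvLoop_eq ending lines [] none rfl
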